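-- pv_equiv track=rewrite | github.com/aboissonnas/base10bdays | utils.py | count_days_to_year_end
-- ===== SOURCE A (Python) =====
-- def is_evenly_divisible(num, divisor):
--
--     return num % divisor == 0
--
-- def is_leap_year(year):
--
--     is_fourth_year = is_evenly_divisible(year, 4)
--     is_century = is_evenly_divisible(year, 100)
--     is_fourth_century = is_evenly_divisible(year, 400)
--
--     # every 4th year is a leap year, except for the year that is a century. the 4th century, however, is also a leap year.
--     return (is_fourth_year and not is_century) or is_fourth_century
--
-- def list_of_days_in_each_month(year):
--
--     days_in_months = [31, 28, 31, 30, 31, 30, 31, 31, 30, 31, 30, 31]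
--
--     # february has 29 days in leap years
--     if is_leap_year(year):
--         days_in_months[1] = 29
--
--     return days_in_months
--
-- def count_days_to_year_end(day, month, year):
--
--     days_in_months = list_of_days_in_each_month(year)
--     days_counter = 0
--
--     # if the month is larger than 12, assume december is what's meant
--     if month > 12:
--         month = 12
--     # if the month is negative, assume january is what's meant
--     elif month < 1:
--         month = 1
--
--     # if the day is negative, assume the 1st day of the month is what's meant
--     if day <= 0:
--         day = 1
--     # if the day is larger than the # in the month, assume the last day of the month is what's meant
--     elif day > days_in_months[month - 1]:
--         day = days_in_months[month - 1]
--
--     # add days remaining in month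
--     days_counter += days_in_months[month - 1] - day
--
--     # add days in months until end of year
--     for i in range(month, 12): # range() is inclusive of the start number and exclusive of the stop number, but lists are 0-indexed
--         days_counter += days_in_months[i]
--
--     return days_counter
-- ===== SOURCE B (Python) =====
-- def is_leap_year(year):
--     return (year % 4 == 0 and year % 100 != 0) or year % 400 == 0
--
-- def list_of_days_in_each_month(year):
--     days_in_months = [31, 28, 31, 30, 31, 30, 31, 31, 30, 31, 30, 31]
--     if is_leap_year(year):
--         days_in_months[1] = 29
--     return days_in_months
--
-- def count_days_to_year_end(day, month, year):
--     dim = list_of_days_in_each_month(year)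
--     # clamp the month into the year and the day up to at least 1; no upper clamp on
--     # the day is needed: counting strictly-later calendar dates absorbs an overshoot
--     if month > 12:
--         month = 12
--     elif month < 1:
--         month = 1
--     if day < 1:
--         day = 1
--     # materialise the year's calendar and count the dates strictly after the given one
--     calendar = [(m, d) for m in range(1, 13) for d in range(1, dim[m - 1] + 1)]
--     return sum(1 for md in calendar if md > (month, day))
-- ===== Notes on version B (the rewrite author's own statement) =====
-- stated objective: alternative
-- what changed: B materialises the year's calendar as an explicit list of (month, day) pairs and counts the dates strictly after the (clamped) input date by lexicographic comparison, instead of A's arithmetic of remaining-days-in-month plus a loop over the remaining months; the upper day clamp disappears because counting strictly-later dates absorbs an overshooting day.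
import Mathlib
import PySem

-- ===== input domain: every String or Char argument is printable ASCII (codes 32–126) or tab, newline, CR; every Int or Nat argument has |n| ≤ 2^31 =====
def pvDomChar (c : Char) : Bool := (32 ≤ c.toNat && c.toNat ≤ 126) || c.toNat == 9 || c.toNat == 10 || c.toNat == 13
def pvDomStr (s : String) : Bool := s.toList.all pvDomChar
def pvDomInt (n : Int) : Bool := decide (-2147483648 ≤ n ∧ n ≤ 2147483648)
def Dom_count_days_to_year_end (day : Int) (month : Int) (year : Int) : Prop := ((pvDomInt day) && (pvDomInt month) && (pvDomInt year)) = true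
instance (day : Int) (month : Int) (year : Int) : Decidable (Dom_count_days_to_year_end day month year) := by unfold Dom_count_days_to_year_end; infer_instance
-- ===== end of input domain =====

-- B materialises the year's calendar and counts the dates strictly after the (clamped) input date, instead of A's remaining-in-month + remaining-months arithmetic; return values proved equal everywhere.

-- ===== PORT A =====
def is_evenly_divisible (num : Int) (divisor : Int) : Bool :=
  PySem.Int.mod num divisor == 0

def is_leap_year (year : Int) : Bool :=
  let is_fourth_year := is_evenly_divisible year 4
  let is_century := is_evenly_divisible year 100
  let is_fourth_century := is_evenly_divisible year 400
  (is_fourth_year && !is_century) || is_fourth_century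

def list_of_days_in_each_month (year : Int) : List Int :=
  let days_in_months : List Int := [31, 28, 31, 30, 31, 30, 31, 31, 30, 31, 30, 31]
  if is_leap_year year then days_in_months.set 1 29 else days_in_months

def count_days_to_year_end (day : Int) (month : Int) (year : Int) : Int :=
  let dim := list_of_days_in_each_month year
  let month := if month > 12 then 12 else if month < 1 then 1 else month
  -- index month-1 is always in range after clamping, so pyGetD's default is never used
  let day := if day ≤ 0 then (1 : Int)
             else if day > PySem.List.pyGetD dim (month - 1) 0 then PySem.List.pyGetD dim (month - 1) 0
             else day
  let days_counter := (0 : Int) + (PySem.List.pyGetD dim (month - 1) 0 - day)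
  (PySem.List.pyRange month 12 1).foldl (fun acc i => acc + PySem.List.pyGetD dim i 0) days_counter

-- ===== PORT B =====
def is_leap_year_alt (year : Int) : Bool :=
  (PySem.Int.mod year 4 == 0 && PySem.Int.mod year 100 != 0) || PySem.Int.mod year 400 == 0

def list_of_days_in_each_month_alt (year : Int) : List Int :=
  let days_in_months : List Int := [31, 28, 31, 30, 31, 30, 31, 31, 30, 31, 30, 31]
  if is_leap_year_alt year then days_in_months.set 1 29 else days_in_months

def count_days_to_year_end_alt (day : Int) (month : Int) (year : Int) : Int :=
  let dim := list_of_days_in_each_month_alt year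
  let month := if month > 12 then 12 else if month < 1 then 1 else month
  let day := if day < 1 then (1 : Int) else day
  -- the calendar comprehension; Python tuple '>' is ported as its lexicographic meaning
  let calendar := (PySem.List.pyRange 1 13 1).flatMap (fun m =>
      (PySem.List.pyRange 1 (PySem.List.pyGetD dim (m - 1) 0 + 1) 1).map (fun d => (m, d)))
  -- sum(1 for md in calendar if md > (month, day)) is the count of elements passing the test
  ((calendar.countP (fun md =>
      decide (month < md.1) || ((md.1 == month) && decide (day < md.2))) : Int))

-- ===== PRECONDITION & SPEC =====
def Spec_count_days_to_year_end (day : Int) (month : Int) (year : Int) (out : Int) : Prop := out = count_days_to_year_end_alt day month year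
instance (day : Int) (month : Int) (year : Int) (out : Int) : Decidable (Spec_count_days_to_year_end day month year out) := by unfold Spec_count_days_to_year_end; infer_instance

-- ===== CLAIM (what is proved, stated in full; the proofs are below) =====
def Claim_equal_count_days_to_year_end : Prop := ∀ (day : Int) (month : Int) (year : Int), Dom_count_days_to_year_end day month year → Spec_count_days_to_year_end day month year (count_days_to_year_end day month year)

-- ===== LEMMAS AND PROOFS =====

theorem leap_eq (year : Int) : is_leap_year_alt year = is_leap_year year := by
  simp [is_leap_year_alt, is_leap_year, is_evenly_divisible, bne]

theorem dim_eq (year : Int) :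
    list_of_days_in_each_month_alt year = list_of_days_in_each_month year := by
  simp [list_of_days_in_each_month_alt, list_of_days_in_each_month, leap_eq]

-- counting the days of a month that lie strictly after 'day'
theorem cnt (n : ℕ) (day : Int) :
    ((PySem.List.pyRange 1 ((n : Int) + 1) 1).countP (fun d => decide (day < d)) : Int)
      = ↑n - min (max day 0) ↑n := by
  induction n with
  | zero => simp
  | succ n ih =>
      rw [show ((n + 1 : ℕ) : Int) + 1 = ((n : Int) + 1) + 1 by push_cast; ring,
          PySem.List.pyRange_one_succ_right (by omega)]
      simp only [List.countP_append, List.countP_cons, List.countP_nil]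
      push_cast
      rcases Classical.em (day < (n : Int) + 1) with h | h <;> simp [h] <;> omega


theorem cnt' (b : Int) (day : Int) (hb : 1 ≤ b) :
    ((PySem.List.pyRange 1 b 1).countP (fun d => decide (day < d)) : Int)
      = (b - 1) - min (max day 0) (b - 1) := by
  have h : b = ((b - 1).toNat : Int) + 1 := by omega
  rw [h, cnt]; omega

set_option maxHeartbeats 1000000 in
theorem core (dim : List Int)
    (hdim : dim = [31, 28, 31, 30, 31, 30, 31, 31, 30, 31, 30, 31] ∨
            dim = [31, 29, 31, 30, 31, 30, 31, 31, 30, 31, 30, 31])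
    (m day : Int) (hm : 1 ≤ m ∧ m ≤ 12) :
    (PySem.List.pyRange m 12 1).foldl (fun acc i => acc + PySem.List.pyGetD dim i 0)
        ((0 : Int) + (PySem.List.pyGetD dim (m - 1) 0 -
          (if day ≤ 0 then (1 : Int)
           else if day > PySem.List.pyGetD dim (m - 1) 0 then PySem.List.pyGetD dim (m - 1) 0
           else day)))
      = (((PySem.List.pyRange 1 13 1).flatMap (fun m' =>
            (PySem.List.pyRange 1 (PySem.List.pyGetD dim (m' - 1) 0 + 1) 1).map (fun d => (m', d)))).countP
          (fun md => decide (m < md.1) || ((md.1 == m) && decide ((if day < 1 then (1 : Int) else day) < md.2))) : Int) := by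
  obtain ⟨h1, h2⟩ := hm
  rw [show PySem.List.pyRange 1 13 1 = [1,2,3,4,5,6,7,8,9,10,11,12] from by decide]
  rcases hdim with h | h <;> subst h <;> interval_cases m <;>
    simp only [List.flatMap_cons, List.flatMap_nil, List.append_nil, List.countP_append,
      List.countP_map] <;>
    simp [Function.comp_def, PySem.List.pyGetD_ofNat', cnt', List.countP_true,
      PySem.List.length_pyRange_one] <;>
    (try simp [PySem.List.pyRange_one, List.range_succ, PySem.List.pyGetD_ofNat']) <;>
    (try split_ifs) <;> omega

-- ===== VERDICT (by name: the statement is the Claim_ definition above) =====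
theorem count_days_to_year_end_spec : Claim_equal_count_days_to_year_end := by
  intro day month year _
  unfold Spec_count_days_to_year_end count_days_to_year_end count_days_to_year_end_alt
  rw [dim_eq]
  have hdim : list_of_days_in_each_month year = [31, 28, 31, 30, 31, 30, 31, 31, 30, 31, 30, 31] ∨
      list_of_days_in_each_month year = [31, 29, 31, 30, 31, 30, 31, 31, 30, 31, 30, 31] := by
    unfold list_of_days_in_each_month
    by_cases h : is_leap_year year = true <;> simp [h]
  have hm : 1 ≤ (if month > 12 then 12 else if month < 1 then 1 else month) ∧
      (if month > 12 then 12 else if month < 1 then 1 else month) ≤ 12 := by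
    split_ifs <;> omega
  exact core _ hdim _ day hm
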